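-- pv_equiv track=rewrite | github.com/kolyapain/search | Lab-2 Boolean Search/InvertedIndex.py | step_one
-- ===== SOURCE A (Python) =====
-- def step_one(lists, ids):
--     min = lists[0][ids[0]]
--     min_ids = [0]
--     for i in range(1, len(lists)):
--         if lists[i][ids[i]] < min:
--             min = lists[i][ids[i]]
--             min_ids = [i]
--         elif lists[i][ids[i]] == min:
--             min_ids.append(i)
--
--     for min_id in min_ids:
--         ids[min_id] += 1
--         if ids[min_id] == len(lists[min_id]):
--             return True
--     return False
-- ===== SOURCE B (Python) =====
-- def step_one(lists, ids):
--     # Divide and conquer over the index range [lo, hi).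
--     def fmin(lo, hi):
--         # minimum of the current front values lists[j][ids[j]] for j in [lo, hi)
--         if hi - lo == 1:
--             return lists[lo][ids[lo]]
--         mid = (lo + hi) // 2
--         a = fmin(lo, mid)
--         b = fmin(mid, hi)
--         return a if a <= b else b
--
--     def advance(lo, hi, m):
--         # advance every pointer in [lo, hi) whose front equals m, left to right,
--         # stopping (True) as soon as one list is exhausted
--         if hi - lo == 1:
--             if lists[lo][ids[lo]] == m:
--                 ids[lo] += 1
--                 if ids[lo] == len(lists[lo]):
--                     return True
--             return False
--         mid = (lo + hi) // 2
--         return advance(lo, mid, m) or advance(mid, hi, m)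
--
--     return advance(0, len(lists), fmin(0, len(lists)))
-- ===== Notes on version B (the rewrite author's own statement) =====
-- stated objective: alternative
-- what changed: A's fused linear scan (running min with an argmin-index list, then a linear advancing loop with early return) is replaced by divide-and-conquer on the index range: a recursive halving computes the minimum front, and a second recursive halving advances the minimal pointers left-first with a short-circuit or.
import Mathlib
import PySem

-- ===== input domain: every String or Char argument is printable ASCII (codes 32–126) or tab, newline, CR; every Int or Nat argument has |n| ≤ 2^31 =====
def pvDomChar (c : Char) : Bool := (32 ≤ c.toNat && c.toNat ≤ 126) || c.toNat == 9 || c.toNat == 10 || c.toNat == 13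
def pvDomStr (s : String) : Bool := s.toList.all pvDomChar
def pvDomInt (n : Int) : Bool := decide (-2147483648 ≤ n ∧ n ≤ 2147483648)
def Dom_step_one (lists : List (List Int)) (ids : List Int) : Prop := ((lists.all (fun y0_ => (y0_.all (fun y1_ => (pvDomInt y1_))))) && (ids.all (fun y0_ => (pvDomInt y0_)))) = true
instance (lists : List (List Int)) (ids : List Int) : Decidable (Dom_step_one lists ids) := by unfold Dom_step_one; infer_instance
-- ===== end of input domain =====

-- B replaces A's fused single scan (running min + argmin-index list, then a linear advancing
-- loop) by a divide-and-conquer decomposition: recursive halving computes the minimum front,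
-- and a second recursive halving (left-first, short-circuit `or`) advances the minimal pointers.
-- Objective: alternative. Both A and B mutate `ids` in place identically (ascending order,
-- stop at first exhausted list); the theorem is about the return value only.


-- ===== PORT A =====
-- lists[i][ids[i]] (defaults only reachable outside Pre_)
def pvFront (lists : List (List Int)) (ids : List Int) (i : Int) : Int :=
  PySem.List.pyGetD (PySem.List.pyGetD lists i ([] : List Int)) (PySem.List.pyGetD ids i 0) 0

-- A's second loop: `ids[min_id] += 1; if ids[min_id] == len(lists[min_id]): return True`.
-- The visited indices are pairwise distinct, so the in-place increment of ids[min_id]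
-- cannot be observed by a later iteration; each step thus tests ids[i]+1 == len(lists[i]).
def pvAdvance (lists : List (List Int)) (ids : List Int) : List Int → Bool
  | [] => false
  | i :: rest =>
    if PySem.List.pyGetD ids i 0 + 1 = ((PySem.List.pyGetD lists i ([] : List Int)).length : Int)
    then true else pvAdvance lists ids rest

-- one iteration of A's first loop: track the running min and the list of its indices
def pvStep (lists : List (List Int)) (ids : List Int) (st : Int × List Int) (i : Int) :
    Int × List Int :=
  if pvFront lists ids i < st.1 then (pvFront lists ids i, [i])
  else if pvFront lists ids i = st.1 then (st.1, st.2 ++ [i])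
  else st

def pvFold (lists : List (List Int)) (ids : List Int) (n : Int) : Int × List Int :=
  (PySem.List.pyRange 1 n 1).foldl (pvStep lists ids) (pvFront lists ids 0, [0])

def step_one (lists : List (List Int)) (ids : List Int) : Bool :=
  pvAdvance lists ids (pvFold lists ids (lists.length : Int)).2

-- ===== PORT B =====
-- B's fmin(lo, hi): divide-and-conquer minimum of the fronts over [lo, hi).
-- Python tests `hi - lo == 1` for the leaf; the port's guard `lo + 1 < hi` is the same
-- computation on every nonempty range and merely makes the recursion total (on the
-- degenerate range hi ≤ lo the Python raises/recurses forever, outside Pre_).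
def pvFMin (lists : List (List Int)) (ids : List Int) (lo hi : Nat) : Int :=
  if h : lo + 1 < hi then
    let mid := (lo + hi) / 2
    let a := pvFMin lists ids lo mid
    let b := pvFMin lists ids mid hi
    if a ≤ b then a else b
  else pvFront lists ids (lo : Int)
termination_by hi - lo
decreasing_by all_goals omega

-- B's advance(lo, hi, m): the leaf advances ids[lo] when its front equals m and reports
-- exhaustion (ids[lo]+1 == len(lists[lo]); increments hit pairwise-distinct indices, so
-- the mutation is unobservable by other leaves); nodes combine left-first with `or`.
def pvAdvB (lists : List (List Int)) (ids : List Int) (m : Int) (lo hi : Nat) : Bool :=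
  if h : lo + 1 < hi then
    let mid := (lo + hi) / 2
    pvAdvB lists ids m lo mid || pvAdvB lists ids m mid hi
  else
    if pvFront lists ids (lo : Int) = m then
      (if PySem.List.pyGetD ids (lo : Int) 0 + 1
          = ((PySem.List.pyGetD lists (lo : Int) ([] : List Int)).length : Int)
       then true else false)
    else false
termination_by hi - lo
decreasing_by all_goals omega

def step_one_alt (lists : List (List Int)) (ids : List Int) : Bool :=
  pvAdvB lists ids (pvFMin lists ids 0 lists.length) 0 lists.length

-- ===== PRECONDITION & SPEC =====
-- Exactly the inputs where the Python A returns: lists nonempty, an id for every list,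
-- and each current index valid (Python negative indexing included); otherwise A raises IndexError.
def Pre_step_one (lists : List (List Int)) (ids : List Int) : Prop :=
  lists ≠ [] ∧ lists.length ≤ ids.length ∧
  ∀ i ∈ List.range lists.length,
    (PySem.List.pyGet? (lists.getD i ([] : List Int)) (ids.getD i 0)).isSome = true
instance (lists : List (List Int)) (ids : List Int) : Decidable (Pre_step_one lists ids) := by
  unfold Pre_step_one; infer_instance

def pvWitness_step_one : List (List Int) × List Int := ([[1, 2], [2]], [0, 0])

def Spec_step_one (lists : List (List Int)) (ids : List Int) (out : Bool) : Prop := out = step_one_alt lists ids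
instance (lists : List (List Int)) (ids : List Int) (out : Bool) : Decidable (Spec_step_one lists ids out) := by unfold Spec_step_one; infer_instance

-- ===== CLAIM (what is proved, stated in full; the proofs are below) =====
def Claim_equal_step_one : Prop := ∀ (lists : List (List Int)) (ids : List Int), Dom_step_one lists ids → Pre_step_one lists ids → Spec_step_one lists ids (step_one lists ids)

-- ===== LEMMAS AND PROOFS =====

-- Characterisation of A's first loop: the accumulated value is the minimum of the fronts
-- over [0, n) and the accumulated index list is exactly the ascending argmin indices.
theorem foldA_inv (lists : List (List Int)) (ids : List Int) :
    ∀ n : Nat, 1 ≤ n →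
      (∃ i ∈ PySem.List.pyRange 0 (n : Int) 1,
          pvFront lists ids i = (pvFold lists ids (n : Int)).1) ∧
      (∀ i ∈ PySem.List.pyRange 0 (n : Int) 1,
          (pvFold lists ids (n : Int)).1 ≤ pvFront lists ids i) ∧
      (pvFold lists ids (n : Int)).2 =
        (PySem.List.pyRange 0 (n : Int) 1).filter
          (fun i => pvFront lists ids i == (pvFold lists ids (n : Int)).1) := by
  intro n hn
  induction n, hn using Nat.le_induction with
  | base =>
    have h1 : PySem.List.pyRange 1 1 1 = [] :=
      PySem.List.pyRange_one_eq_nil le_rfl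
    have h0 : PySem.List.pyRange 0 1 1 = [0] := by
      rw [show (1:Int) = 0+1 from rfl]
      exact PySem.List.pyRange_one_singleton 0
    refine ⟨⟨0, ?_, rfl⟩, ?_, ?_⟩ <;>
      simp [pvFold, h1, h0]
  | succ n hn ih =>
    obtain ⟨⟨i0, hi0, hfi0⟩, hmin, hfil⟩ := ih
    have hsplit : (PySem.List.pyRange 1 ((n+1 : Nat) : Int) 1)
        = PySem.List.pyRange 1 (n : Int) 1 ++ [(n : Int)] := by
      push_cast
      exact PySem.List.pyRange_one_succ_right (by exact_mod_cast hn)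
    have hsplit0 : (PySem.List.pyRange 0 ((n+1 : Nat) : Int) 1)
        = PySem.List.pyRange 0 (n : Int) 1 ++ [(n : Int)] := by
      push_cast
      exact PySem.List.pyRange_one_succ_right (by positivity)
    have hfold : pvFold lists ids ((n+1 : Nat) : Int)
        = pvStep lists ids (pvFold lists ids (n : Int)) (n : Int) := by
      unfold pvFold
      rw [hsplit, List.foldl_append]
      rfl
    set old := pvFold lists ids (n : Int) with hold
    by_cases h1 : pvFront lists ids (n : Int) < old.1
    · -- strictly new minimum: state resets to (f n, [n])
      have hst : pvFold lists ids ((n+1 : Nat) : Int) = (pvFront lists ids (n : Int), [(n : Int)]) := by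
        rw [hfold]; simp [pvStep, h1]
      refine ⟨⟨(n : Int), ?_, by rw [hst]⟩, ?_, ?_⟩
      · rw [hsplit0]; simp
      · intro i hi
        rw [hsplit0] at hi
        rcases List.mem_append.1 hi with hi | hi
        · rw [hst]; exact le_trans (le_of_lt h1) (hmin i hi)
        · simp at hi; rw [hst, hi]
      · rw [hst, hsplit0, List.filter_append]
        have : (PySem.List.pyRange 0 (n : Int) 1).filter
            (fun i => pvFront lists ids i == pvFront lists ids (n : Int)) = [] := by
          refine List.filter_eq_nil_iff.2 ?_
          intro i hi hbeq
          have := hmin i hi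
          have hEQ : pvFront lists ids i = pvFront lists ids (n : Int) := by
            simpa using hbeq
          omega
        simp [this]
    · by_cases h2 : pvFront lists ids (n : Int) = old.1
      · -- ties the minimum: index appended
        have hst : pvFold lists ids ((n+1 : Nat) : Int) = (old.1, old.2 ++ [(n : Int)]) := by
          rw [hfold]; simp [pvStep, h2]
        refine ⟨⟨i0, ?_, ?_⟩, ?_, ?_⟩
        · rw [hsplit0]; exact List.mem_append_left _ hi0
        · rw [hst]; exact hfi0
        · intro i hi
          rw [hsplit0] at hi
          rcases List.mem_append.1 hi with hi | hi
          · rw [hst]; exact hmin i hi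
          · simp at hi; rw [hst, hi, h2]
        · rw [hst, hsplit0, List.filter_append]
          simp [h2, hfil]
      · -- larger than the minimum: state unchanged
        have hst : pvFold lists ids ((n+1 : Nat) : Int) = old := by
          rw [hfold]; simp [pvStep, h1, h2]
        refine ⟨⟨i0, ?_, ?_⟩, ?_, ?_⟩
        · rw [hsplit0]; exact List.mem_append_left _ hi0
        · rw [hst]; exact hfi0
        · intro i hi
          rw [hsplit0] at hi
          rcases List.mem_append.1 hi with hi | hi
          · rw [hst]; exact hmin i hi
          · simp at hi; rw [hst, hi]; omega
        · rw [hst, hsplit0, List.filter_append]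
          simp [h2, hfil]

-- B's fmin(lo, hi) is attained and a lower bound over [lo, hi).
theorem fmin_spec_fuel (lists : List (List Int)) (ids : List Int) :
    ∀ (d lo hi : Nat), hi - lo ≤ d → lo < hi →
      (∃ j : Nat, lo ≤ j ∧ j < hi ∧ pvFront lists ids (j : Int) = pvFMin lists ids lo hi) ∧
      (∀ j : Nat, lo ≤ j → j < hi → pvFMin lists ids lo hi ≤ pvFront lists ids (j : Int)) := by
  intro d
  induction d with
  | zero => intro lo hi hle hlt; omega
  | succ d ih =>
    intro lo hi hle hlt
    by_cases h : lo + 1 < hi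
    · have h1 : lo < (lo + hi) / 2 := by omega
      have h2 : (lo + hi) / 2 < hi := by omega
      obtain ⟨⟨jl, hjl1, hjl2, hjl3⟩, hboundl⟩ := ih lo ((lo + hi) / 2) (by omega) h1
      obtain ⟨⟨jr, hjr1, hjr2, hjr3⟩, hboundr⟩ := ih ((lo + hi) / 2) hi (by omega) h2
      have hdef : pvFMin lists ids lo hi =
          if pvFMin lists ids lo ((lo + hi) / 2) ≤ pvFMin lists ids ((lo + hi) / 2) hi
          then pvFMin lists ids lo ((lo + hi) / 2) else pvFMin lists ids ((lo + hi) / 2) hi := by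
        rw [pvFMin]; simp [h]
      constructor
      · by_cases hab : pvFMin lists ids lo ((lo + hi) / 2) ≤ pvFMin lists ids ((lo + hi) / 2) hi
        · exact ⟨jl, hjl1, by omega, by rw [hdef, if_pos hab]; exact hjl3⟩
        · exact ⟨jr, by omega, hjr2, by rw [hdef, if_neg hab]; exact hjr3⟩
      · intro j hj1 hj2
        rw [hdef]
        by_cases hj : j < (lo + hi) / 2
        · have := hboundl j hj1 hj
          split_ifs with hab <;> omega
        · have := hboundr j (by omega) hj2
          split_ifs with hab <;> omega
    · have hdef : pvFMin lists ids lo hi = pvFront lists ids (lo : Int) := by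
        rw [pvFMin]; simp [h]
      exact ⟨⟨lo, le_rfl, hlt, hdef.symm⟩, fun j hj1 hj2 => by
        have hjlo : j = lo := by omega
        rw [hdef, hjlo]⟩

-- pvAdvance is an "any" over its index list: it distributes over append.
theorem advance_append (lists : List (List Int)) (ids : List Int) (xs ys : List Int) :
    pvAdvance lists ids (xs ++ ys) = (pvAdvance lists ids xs || pvAdvance lists ids ys) := by
  induction xs with
  | nil => simp [pvAdvance]
  | cons i rest ih =>
    by_cases h : PySem.List.pyGetD ids i 0 + 1
        = ((PySem.List.pyGetD lists i ([] : List Int)).length : Int)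
    · simp [pvAdvance, h]
    · simp [pvAdvance, h, ih]

-- B's advance(lo, hi, m) equals A's advancing loop run on the m-fronted indices of [lo, hi).
theorem advB_eq_fuel (lists : List (List Int)) (ids : List Int) (m : Int) :
    ∀ (d lo hi : Nat), hi - lo ≤ d → lo < hi →
      pvAdvB lists ids m lo hi =
        pvAdvance lists ids
          ((PySem.List.pyRange (lo : Int) (hi : Int) 1).filter
            (fun j => pvFront lists ids j == m)) := by
  intro d
  induction d with
  | zero => intro lo hi hle hlt; omega
  | succ d ih =>
    intro lo hi hle hlt
    by_cases h : lo + 1 < hi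
    · have h1 : lo < (lo + hi) / 2 := by omega
      have h2 : (lo + hi) / 2 < hi := by omega
      have hsplit : PySem.List.pyRange (lo : Int) (hi : Int) 1
          = PySem.List.pyRange (lo : Int) (((lo + hi) / 2 : Nat) : Int) 1
            ++ PySem.List.pyRange (((lo + hi) / 2 : Nat) : Int) (hi : Int) 1 :=
        PySem.List.pyRange_one_append _ _ _ (by exact_mod_cast Nat.le_of_lt h1)
          (by exact_mod_cast Nat.le_of_lt h2)
      have hdef : pvAdvB lists ids m lo hi =
          (pvAdvB lists ids m lo ((lo + hi) / 2) || pvAdvB lists ids m ((lo + hi) / 2) hi) := by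
        rw [pvAdvB]; simp [h]
      rw [hdef, ih lo ((lo + hi) / 2) (by omega) h1, ih ((lo + hi) / 2) hi (by omega) h2,
        hsplit, List.filter_append, advance_append]
    · have hone : PySem.List.pyRange (lo : Int) (hi : Int) 1 = [(lo : Int)] := by
        have hcast : (hi : Int) = (lo : Int) + 1 := by exact_mod_cast (by omega : hi = lo + 1)
        rw [hcast]
        exact PySem.List.pyRange_one_singleton _
      have hdef : pvAdvB lists ids m lo hi =
          (if pvFront lists ids (lo : Int) = m then
            (if PySem.List.pyGetD ids (lo : Int) 0 + 1
                = ((PySem.List.pyGetD lists (lo : Int) ([] : List Int)).length : Int)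
             then true else false)
          else false) := by
        rw [pvAdvB]; simp [h]
      rw [hone, hdef]
      by_cases hfm : pvFront lists ids (lo : Int) = m
      · simp [pvAdvance, hfm]
      · simp [pvAdvance, hfm]

-- ===== VERDICT (by name: the statement is the Claim_ definition above) =====
theorem step_one_spec : Claim_equal_step_one := by
  intro lists ids _ hpre
  obtain ⟨hne, -, -⟩ := hpre
  have hn : 1 ≤ lists.length := List.length_pos_of_ne_nil hne
  obtain ⟨⟨i0, hi0, hfi0⟩, hmin, hfil⟩ := foldA_inv lists ids lists.length hn
  obtain ⟨⟨j0, hj01, hj02, hj03⟩, hbound⟩ :=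
    fmin_spec_fuel lists ids lists.length 0 lists.length (by omega) (by omega)
  unfold Spec_step_one step_one step_one_alt
  set n := lists.length with hnn
  -- the two minima agree
  have hmeq : pvFMin lists ids 0 n = (pvFold lists ids (n : Int)).1 := by
    apply le_antisymm
    · obtain ⟨hi00, hi0n⟩ := (PySem.List.mem_pyRange_one).1 hi0
      have hcast : i0 = ((i0.toNat : Nat) : Int) := by omega
      calc pvFMin lists ids 0 n ≤ pvFront lists ids ((i0.toNat : Nat) : Int) :=
            hbound i0.toNat (by omega) (by omega)
        _ = (pvFold lists ids (n : Int)).1 := by rw [← hcast]; exact hfi0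
    · rw [← hj03]
      exact hmin (j0 : Int) ((PySem.List.mem_pyRange_one).2 ⟨by omega, by exact_mod_cast hj02⟩)
  rw [advB_eq_fuel lists ids _ n 0 n (by omega) (by omega), hmeq]
  rw [show ((0 : Nat) : Int) = (0 : Int) from rfl, ← hfil]
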